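-- pv_equiv track=rewrite | github.com/ravisjoshi/python_snippets | Strings/MaximumScoreAfterSplittingAString.py | maxScore_method2
-- ===== SOURCE A (Python) =====
-- def maxScore_method2(_string):
--     count_list = []
--     length = len(_string)
--     a = b = 0
--     for index in range(1, len(_string)):
--         first, second = list(_string[:index]), list(_string[index:])
--         a = [a+1 for char in first if char == '0']
--         b = [b+1 for char in second if char == '1']
--         count_list.append(sum(a)+sum(b))
--         a = b = 0
--     return max(count_list)
-- ===== SOURCE B (Python) =====
-- def maxScore_method2(_string):
--     total_ones = sum(1 for ch in _string if ch == '1')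
--     zeros = 0
--     ones = 0
--     best = None
--     for ch in _string[:-1]:
--         if ch == '0':
--             zeros += 1
--         elif ch == '1':
--             ones += 1
--         score = zeros + total_ones - ones
--         if best is None or score > best:
--             best = score
--     return best
-- ===== Notes on version B (the rewrite author's own statement) =====
-- stated objective: faster
-- what changed: Replaced the per-split slicing and re-counting (a fresh O(n) scan of both halves for every split point) by a single left-to-right pass keeping running zero/one counts against the precomputed total number of ones.
import Mathlib
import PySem

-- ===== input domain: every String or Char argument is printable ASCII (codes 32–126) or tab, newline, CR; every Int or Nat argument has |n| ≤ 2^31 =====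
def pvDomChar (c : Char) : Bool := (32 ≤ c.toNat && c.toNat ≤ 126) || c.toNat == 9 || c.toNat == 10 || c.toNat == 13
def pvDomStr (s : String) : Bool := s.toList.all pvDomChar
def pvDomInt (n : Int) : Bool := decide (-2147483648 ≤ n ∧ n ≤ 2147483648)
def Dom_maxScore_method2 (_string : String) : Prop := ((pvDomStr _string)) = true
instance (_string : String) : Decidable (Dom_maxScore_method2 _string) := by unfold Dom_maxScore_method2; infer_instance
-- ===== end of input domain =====

-- B replaces A's per-split slice-and-recount by one O(n) pass with running counts (objective: faster, asymptotic).

-- ===== PORT A =====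
def maxScore_method2 (_string : String) : Int :=
  let cs := _string.toList
  let _length := PySem.Str.len _string
  let count_list : List Int :=
    (PySem.List.pyRange 1 (PySem.Str.len _string) 1).foldl
      (fun count_list index =>
        let first := PySem.List.slice cs none (some index)
        let second := PySem.List.slice cs (some index) none
        let a : List Int := (first.filter (fun char => char == '0')).map (fun _ => (0 : Int) + 1)
        let b : List Int := (second.filter (fun char => char == '1')).map (fun _ => (0 : Int) + 1)
        count_list ++ [a.sum + b.sum]) []
  (PySem.List.max? count_list (fun x => x)).getD 0   -- max([]) raises ValueError: excluded by Pre_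

-- ===== PORT B =====
def maxScore_method2_alt (_string : String) : Int :=
  let cs := _string.toList
  let total_ones : Int := cs.foldl (fun acc ch => if ch == '1' then acc + 1 else acc) 0
  let st :=
    (PySem.List.slice cs none (some (-1))).foldl
      (fun (st : Int × Int × Option Int) ch =>
        let zeros := if ch == '0' then st.1 + 1 else st.1
        let ones := if ch == '0' then st.2.1 else if ch == '1' then st.2.1 + 1 else st.2.1
        let score := zeros + total_ones - ones
        let best :=
          match st.2.2 with
          | none => some score
          | some b => if score > b then some score else some b
        (zeros, ones, best)) (0, 0, none)
  st.2.2.getD 0   -- best is None only for len < 2, excluded by Pre_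

-- ===== PRECONDITION & SPEC =====
-- A raises ValueError (max of an empty list) on strings of length < 2; those are excluded.
def Pre_maxScore_method2 (_string : String) : Prop := 2 ≤ _string.toList.length
instance (_string : String) : Decidable (Pre_maxScore_method2 _string) := by
  unfold Pre_maxScore_method2; infer_instance
def pvWitness_maxScore_method2 : String := "010"

def Spec_maxScore_method2 (_string : String) (out : Int) : Prop := out = maxScore_method2_alt _string
instance (_string : String) (out : Int) : Decidable (Spec_maxScore_method2 _string out) := by
  unfold Spec_maxScore_method2; infer_instance

-- ===== CLAIM (what is proved, stated in full; the proofs are below) =====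
def Claim_equal_maxScore_method2 : Prop :=
  ∀ (_string : String), Dom_maxScore_method2 _string → Pre_maxScore_method2 _string →
    Spec_maxScore_method2 _string (maxScore_method2 _string)

-- ===== LEMMAS AND PROOFS =====

-- zeros / ones in the length-k prefix, and the split score at k
def pvZ (cs : List Char) (k : Nat) : Int := ((cs.take k).countP (fun c => c == '0') : Int)
def pvO (cs : List Char) (k : Nat) : Int := ((cs.take k).countP (fun c => c == '1') : Int)
def pvG (cs : List Char) (k : Nat) : Int :=
  pvZ cs k + ((cs.countP (fun c => c == '1') : Int)) - pvO cs k
-- running max (B's best) over the scores at splits 1..k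
def pvBest (cs : List Char) (k : Nat) : Option Int :=
  match (List.range k).map (fun j => pvG cs (j + 1)) with
  | [] => none
  | x :: t => some (t.foldl max x)

theorem pv_max_eq (b s : Int) : (if s > b then some s else some b) = some (max b s) := by
  by_cases h : s > b <;> simp [h, max_def] <;> omega

theorem pvBest_succ (cs : List Char) (k : Nat) :
    pvBest cs (k + 1) =
      some ((match pvBest cs k with
             | none => pvG cs (k + 1)
             | some b => max b (pvG cs (k + 1)))) := by
  unfold pvBest
  rw [List.range_succ, List.map_append]
  cases h : (List.range k).map (fun j => pvG cs (j + 1)) with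
  | nil => simp
  | cons x t => simp [List.foldl_append]

theorem pv_sum_filter (l : List Char) (p : Char → Bool) :
    ((l.filter p).map (fun _ => (0 : Int) + 1)).sum = (l.countP p : Int) := by
  rw [PySem.List.sum_map_const_int, ← List.countP_eq_length_filter]
  push_cast; ring

theorem pv_total_ones (cs : List Char) :
    cs.foldl (fun acc ch => if ch == '1' then acc + 1 else acc) (0 : Int)
      = (cs.countP (fun c => c == '1') : Int) := by
  have := PySem.List.foldl_beq_add_one cs '1' (0 : Int)
  simp only [this, List.count_eq_countP]
  omega

theorem pv_drop_ones (cs : List Char) (k : Nat) :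
    ((cs.drop k).countP (fun c => c == '1') : Int)
      = (cs.countP (fun c => c == '1') : Int) - pvO cs k := by
  unfold pvO
  have h := List.countP_append (l₁ := cs.take k) (l₂ := cs.drop k) (p := fun c => c == '1')
  rw [List.take_append_drop] at h
  omega

-- A's count_list entry at split index 1+j equals pvG cs (j+1)
theorem pvA_entry (cs : List Char) (j : Nat) :
    (((PySem.List.slice cs none (some ((1 : Int) + j))).filter (fun char => char == '0')).map
        (fun _ => (0 : Int) + 1)).sum
      + (((PySem.List.slice cs (some ((1 : Int) + j)) none).filter (fun char => char == '1')).map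
          (fun _ => (0 : Int) + 1)).sum
      = pvG cs (j + 1) := by
  have h1 : ((1 : Int) + j) = ((j + 1 : Nat) : Int) := by push_cast; ring
  rw [h1, PySem.List.slice_to_natCast, PySem.List.slice_from_natCast,
      pv_sum_filter, pv_sum_filter, pv_drop_ones]
  unfold pvG pvZ
  ring

-- B's loop invariant
theorem pvB_inv (cs : List Char) (T : Int) (hT : T = (cs.countP (fun c => c == '1') : Int))
    (k : Nat) (hk : k ≤ cs.length) :
    (cs.take k).foldl
      (fun (st : Int × Int × Option Int) ch =>
        let zeros := if ch == '0' then st.1 + 1 else st.1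
        let ones := if ch == '0' then st.2.1 else if ch == '1' then st.2.1 + 1 else st.2.1
        let score := zeros + T - ones
        let best :=
          match st.2.2 with
          | none => some score
          | some b => if score > b then some score else some b
        (zeros, ones, best)) (0, 0, none)
    = (pvZ cs k, pvO cs k, pvBest cs k) := by
  induction k with
  | zero => simp [pvZ, pvO, pvBest]
  | succ k ih =>
    have hk' : k < cs.length := by omega
    have ht : cs.take (k + 1) = cs.take k ++ [cs[k]] := by
      rw [List.take_add_one, List.getElem?_eq_getElem hk']; rfl
    have hz : pvZ cs (k + 1) = if cs[k] == '0' then pvZ cs k + 1 else pvZ cs k := by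
      unfold pvZ
      rw [ht, List.countP_append, List.countP_cons]
      by_cases h : cs[k] = '0'
      · simp [h]
      · simp [h]
    have ho : pvO cs (k + 1) =
        if cs[k] == '0' then pvO cs k else if cs[k] == '1' then pvO cs k + 1 else pvO cs k := by
      unfold pvO
      rw [ht, List.countP_append, List.countP_cons]
      by_cases h0 : cs[k] = '0'
      · simp [h0]
      · by_cases h1 : cs[k] = '1'
        · simp [h1]
        · simp [h0, h1]
    rw [ht, List.foldl_append, ih (by omega), List.foldl_cons, List.foldl_nil]
    simp only []
    have hscore :
        (if cs[k] == '0' then pvZ cs k + 1 else pvZ cs k) + T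
          - (if cs[k] == '0' then pvO cs k else if cs[k] == '1' then pvO cs k + 1 else pvO cs k)
        = pvG cs (k + 1) := by
      rw [← hz, ← ho, hT]; unfold pvG; ring
    rw [hscore]
    refine Prod.ext (by simp [hz]) (Prod.ext (by simp [ho]) ?_)
    rw [pvBest_succ]
    cases hb : pvBest cs k with
    | none => simp
    | some b => simp [pv_max_eq]

-- B computes the running max over splits 1 .. n-1
theorem pvB_eq (s : String) :
    maxScore_method2_alt s = (pvBest s.toList (s.toList.length - 1)).getD 0 := by
  unfold maxScore_method2_alt
  simp only [PySem.List.slice_to_neg_one, List.dropLast_eq_take]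
  rw [pv_total_ones, pvB_inv s.toList _ rfl (s.toList.length - 1) (by omega)]

-- A computes max over the same list of scores
theorem pvA_eq (s : String) :
    maxScore_method2 s =
      (PySem.List.max? ((List.range (s.toList.length - 1)).map (fun j => pvG s.toList (j + 1)))
        (fun x => x)).getD 0 := by
  unfold maxScore_method2
  simp only [PySem.List.foldl_append_singleton_eq_map, List.nil_append, PySem.Str.len_eq]
  congr 2
  rw [PySem.List.pyRange_one]
  have hn : ((s.toList.length : Int) - 1).toNat = s.toList.length - 1 := by omega
  rw [hn, List.map_map]
  exact List.map_congr_left (fun j _ => pvA_entry s.toList j)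

theorem pv_maxD_eq_best (cs : List Char) (k : Nat) :
    (PySem.List.max? ((List.range k).map (fun j => pvG cs (j + 1))) (fun x => x)).getD 0
      = (pvBest cs k).getD 0 := by
  unfold pvBest
  cases h : (List.range k).map (fun j => pvG cs (j + 1)) with
  | nil => simp [PySem.List.max?]
  | cons x t => simp [PySem.List.max?_id_cons]

-- ===== VERDICT (by name: the statement is the Claim_ definition above) =====
theorem maxScore_method2_spec : Claim_equal_maxScore_method2 := by
  intro s _ _
  unfold Spec_maxScore_method2
  rw [pvA_eq, pvB_eq, pv_maxD_eq_best]
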